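-- pv_equiv track=rewrite | github.com/kts5927/algorithm | solve/24184.py | remove_short_vowels
-- ===== SOURCE A (Python) =====
-- vowels = {'a', 'e', 'i', 'o', 'u', 'y'}
--
-- consonants = set('bcdfghjklmnpqrstvwxyz')
--
-- def remove_short_vowels(word):
--     new_word = []
--     length = len(word)
--     i = 0
--     while i < length:
--         if word[i] in vowels:
--             if i + 2 < length and word[i+1] in consonants and word[i+2] in consonants:
--                 i += 1
--                 continue
--         new_word.append(word[i])
--         i += 1
--     return ''.join(new_word)
-- ===== SOURCE B (Python) =====
-- VOWELS = set('aeiouy')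
-- CONSONANTS = set('bcdfghjklmnpqrstvwxyz')
--
-- def remove_short_vowels(word):
--     # Scan right-to-left keeping a running count of the consonant run that
--     # starts immediately after the current position; a vowel is dropped
--     # exactly when that run is at least 2. No lookahead is ever done.
--     kept = []
--     run = 0
--     for ch in reversed(word):
--         if not (ch in VOWELS and run >= 2):
--             kept.append(ch)
--         run = run + 1 if ch in CONSONANTS else 0
--     kept.reverse()
--     return ''.join(kept)
-- ===== Notes on version B (the rewrite author's own statement) =====
-- stated objective: alternative
-- what changed: Replaces A's forward index walk with per-step two-character lookahead (i+2<len bounds test) by a reverse scan that maintains a running length of the consonant run to the right of the current character, drops a vowel when that run is >= 2, and reverses the kept characters at the end; the lookahead and bounds test disappear.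
import Mathlib
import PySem

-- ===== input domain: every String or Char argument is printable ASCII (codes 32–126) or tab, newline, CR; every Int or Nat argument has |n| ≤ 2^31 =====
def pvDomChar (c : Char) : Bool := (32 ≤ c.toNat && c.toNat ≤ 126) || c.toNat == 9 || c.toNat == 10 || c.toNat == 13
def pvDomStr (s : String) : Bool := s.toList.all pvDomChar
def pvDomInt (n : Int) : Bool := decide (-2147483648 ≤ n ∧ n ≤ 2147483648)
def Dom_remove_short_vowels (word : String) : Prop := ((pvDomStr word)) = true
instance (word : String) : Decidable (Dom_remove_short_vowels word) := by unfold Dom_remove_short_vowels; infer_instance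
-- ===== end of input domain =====

-- B replaces A's forward walk with two-character lookahead by a reverse scan that carries a
-- running consonant-run counter (objective: alternative decomposition, same cost).

-- ===== PORT A =====
-- vowels = {'a','e','i','o','u','y'}; consonants = set('bcdfghjklmnpqrstvwxyz')
def pvVowelsA : PySem.Set Char := PySem.Set.ofList ['a', 'e', 'i', 'o', 'u', 'y']
def pvConsonantsA : PySem.Set Char := PySem.Set.ofList "bcdfghjklmnpqrstvwxyz".toList

-- the while-loop over index i written as structural recursion on the suffix word[i:]
-- (i + 2 < length ⇔ at least two characters follow the current one; both branches advance i by 1)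
def pvLookaheadA (rest : List Char) : Bool :=
  match rest with
  | b :: d :: _ => decide (b ∈ pvConsonantsA) && decide (d ∈ pvConsonantsA)
  | _ => false

def pvLoopA : List Char → List Char
  | [] => []
  | c :: rest =>
    if c ∈ pvVowelsA ∧ pvLookaheadA rest then pvLoopA rest
    else c :: pvLoopA rest

def remove_short_vowels (word : String) : String :=
  String.ofList (pvLoopA word.toList)

-- ===== PORT B =====
def pvVowelsB : PySem.Set Char := PySem.Set.ofList "aeiouy".toList
def pvConsonantsB : PySem.Set Char := PySem.Set.ofList "bcdfghjklmnpqrstvwxyz".toList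

-- one iteration of B's reverse loop: state = (kept so far, consonant run to the right)
def pvStepB (s : List Char × Nat) (ch : Char) : List Char × Nat :=
  ((if decide (ch ∈ pvVowelsB) && decide (2 ≤ s.2) then s.1 else s.1 ++ [ch]),
   if ch ∈ pvConsonantsB then s.2 + 1 else 0)

def remove_short_vowels_alt (word : String) : String :=
  String.ofList ((List.foldl pvStepB ([], 0) word.toList.reverse).1.reverse)

-- ===== PRECONDITION & SPEC =====
def Spec_remove_short_vowels (word : String) (out : String) : Prop := out = remove_short_vowels_alt word
instance (word : String) (out : String) : Decidable (Spec_remove_short_vowels word out) := by unfold Spec_remove_short_vowels; infer_instance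

-- ===== CLAIM (what is proved, stated in full; the proofs are below) =====
def Claim_equal_remove_short_vowels : Prop := ∀ (word : String), Dom_remove_short_vowels word → Spec_remove_short_vowels word (remove_short_vowels word)

-- ===== LEMMAS AND PROOFS =====

-- length of the consonant run at the head of l (the value B's counter holds for the suffix l)
def pvCrun : List Char → Nat
  | [] => 0
  | c :: r => if c ∈ pvConsonantsB then pvCrun r + 1 else 0

-- A's lookahead on a suffix is exactly "the consonant run of that suffix has length ≥ 2"
lemma pvLookaheadA_crun (rest : List Char) :
    pvLookaheadA rest = decide (2 ≤ pvCrun rest) := by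
  match rest with
  | [] => rfl
  | [b] =>
    by_cases hb : b ∈ pvConsonantsB <;> simp [pvLookaheadA, pvCrun, hb]
  | b :: d :: r =>
    have hC : pvConsonantsA = pvConsonantsB := by decide
    by_cases hb : b ∈ pvConsonantsB <;> by_cases hd : d ∈ pvConsonantsB <;>
      simp [pvLookaheadA, pvCrun, hb, hd, hC]

-- B's foldr (= foldl over the reversed list) computes A's output reversed, paired with the run
lemma pvFoldr_eq (l : List Char) :
    List.foldr (fun x y => pvStepB y x) ([], 0) l = ((pvLoopA l).reverse, pvCrun l) := by
  induction l with
  | nil => rfl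
  | cons c rest ih =>
    have hV : pvVowelsA = pvVowelsB := by decide
    rw [List.foldr_cons, ih]
    simp only [pvStepB, pvLoopA, pvLookaheadA_crun, hV]
    by_cases hv : c ∈ pvVowelsB <;> by_cases hr : 2 ≤ pvCrun rest <;>
      simp [hv, hr, pvCrun]

-- ===== VERDICT (by name: the statement is the Claim_ definition above) =====
theorem remove_short_vowels_spec : Claim_equal_remove_short_vowels := by
  intro word _
  unfold Spec_remove_short_vowels remove_short_vowels remove_short_vowels_alt
  rw [List.foldl_reverse, pvFoldr_eq]
  simp
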